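-- pv_equiv track=rewrite | github.com/aguslugea/SINTAXIS_TP_1 | lexer.py | automata_cerrar_parentesis
-- ===== SOURCE A (Python) =====
-- ESTADO_TRAMPA = "TRAMPA"
--
-- ESTADO_FINAL = "ACEPTADO"
--
-- ESTADO_NO_FINAL = "NO ACEPTADO"
--
-- def condicion_cadena(estado_actual1, estados_finaless):
--
--     if estado_actual1 == -1:
--         return ESTADO_TRAMPA
--     if estado_actual1 in estados_finaless:
--         return ESTADO_FINAL
--     else:
--         return ESTADO_NO_FINAL
--
-- def automata_cerrar_parentesis(cadena):
--     simbolos = [")"]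
--
--     estado_actual = 0
--     estados_finales = [1]
--
--     for caracter in cadena:
--         if estado_actual == 0 and caracter in simbolos:
--             estado_actual = 1
--         else:
--             estado_actual = - 1
--             break
--
--     return condicion_cadena(estado_actual, estados_finales)
-- ===== SOURCE B (Python) =====
-- ESTADO_TRAMPA = "TRAMPA"
-- ESTADO_FINAL = "ACEPTADO"
-- ESTADO_NO_FINAL = "NO ACEPTADO"
--
-- def automata_cerrar_parentesis(cadena):
--     if cadena == ")":
--         return ESTADO_FINAL
--     if cadena == "":
--         return ESTADO_NO_FINAL
--     return ESTADO_TRAMPA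
-- ===== Notes on version B (the rewrite author's own statement) =====
-- stated objective: simpler
-- what changed: Replaces the per-character DFA state loop with a closed-form three-way dispatch on the whole string: the single close-paren string accepts, the empty string is non-final, anything else traps.
import Mathlib
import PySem

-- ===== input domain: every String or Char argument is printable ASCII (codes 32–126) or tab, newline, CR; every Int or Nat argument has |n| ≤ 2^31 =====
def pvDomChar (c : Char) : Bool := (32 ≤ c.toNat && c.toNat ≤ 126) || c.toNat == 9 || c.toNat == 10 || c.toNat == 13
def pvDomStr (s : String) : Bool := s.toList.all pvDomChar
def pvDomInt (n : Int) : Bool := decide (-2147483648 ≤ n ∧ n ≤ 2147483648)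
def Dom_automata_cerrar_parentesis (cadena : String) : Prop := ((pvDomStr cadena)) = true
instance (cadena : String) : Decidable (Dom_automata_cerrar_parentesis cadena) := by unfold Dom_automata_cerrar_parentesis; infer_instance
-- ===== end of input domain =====

-- B replaces A's per-character DFA loop with a closed-form three-way dispatch on the whole string (simpler; same return value everywhere).
-- ===== PORT A =====
def ESTADO_TRAMPA : String := "TRAMPA"
def ESTADO_FINAL : String := "ACEPTADO"
def ESTADO_NO_FINAL : String := "NO ACEPTADO"

def condicion_cadena (estado_actual1 : Int) (estados_finaless : List Int) : String :=
  if estado_actual1 = -1 then ESTADO_TRAMPA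
  else if estado_actual1 ∈ estados_finaless then ESTADO_FINAL
  else ESTADO_NO_FINAL

-- the for-loop with break: returns the final estado_actual
def acpLoop (estado_actual : Int) : List Char → Int
  | [] => estado_actual
  | caracter :: rest =>
      if estado_actual = 0 ∧ caracter ∈ [')'] then acpLoop 1 rest
      else -1  -- break

def automata_cerrar_parentesis (cadena : String) : String :=
  condicion_cadena (acpLoop 0 cadena.toList) [1]

-- ===== PORT B =====
def automata_cerrar_parentesis_alt (cadena : String) : String :=
  if cadena = ")" then ESTADO_FINAL
  else if cadena = "" then ESTADO_NO_FINAL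
  else ESTADO_TRAMPA

-- ===== PRECONDITION & SPEC =====
def Spec_automata_cerrar_parentesis (cadena : String) (out : String) : Prop := out = automata_cerrar_parentesis_alt cadena
instance (cadena : String) (out : String) : Decidable (Spec_automata_cerrar_parentesis cadena out) := by unfold Spec_automata_cerrar_parentesis; infer_instance

-- ===== CLAIM (what is proved, stated in full; the proofs are below) =====
def Claim_equal_automata_cerrar_parentesis : Prop := ∀ (cadena : String), Dom_automata_cerrar_parentesis cadena → Spec_automata_cerrar_parentesis cadena (automata_cerrar_parentesis cadena)

-- ===== LEMMAS AND PROOFS =====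

-- ===== VERDICT (by name: the statement is the Claim_ definition above) =====
lemma acp_string_eq_iff (cadena : String) (l : List Char) :
    cadena = String.ofList l ↔ cadena.toList = l := by
  constructor
  · intro h; subst h; simp
  · intro h; apply String.toList_inj.mp; simpa using h

theorem automata_cerrar_parentesis_spec : Claim_equal_automata_cerrar_parentesis := by
  intro cadena _
  unfold Spec_automata_cerrar_parentesis automata_cerrar_parentesis automata_cerrar_parentesis_alt
  have h1 : (cadena = String.ofList [')']) ↔ cadena.toList = [')'] := acp_string_eq_iff cadena [')']
  have h2 : (cadena = String.ofList []) ↔ cadena.toList = [] := acp_string_eq_iff cadena []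
  rcases hl : cadena.toList with _ | ⟨c, _ | ⟨c2, rest⟩⟩
  · simp [h1, h2, hl, acpLoop, condicion_cadena]
  · by_cases hc : c = ')'
    · subst hc; simp [h1, hl, acpLoop, condicion_cadena]
    · simp [h1, h2, hl, acpLoop, condicion_cadena, hc]
  · by_cases hc : c = ')'
    · subst hc; simp [h1, h2, hl, acpLoop, condicion_cadena]
    · simp [h1, h2, hl, acpLoop, condicion_cadena, hc]
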